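-- pv_equiv track=rewrite | github.com/ahmadnaufalhakim/modified-rc4 | src/mod_rc4.py | preprocess_hex_chars
-- ===== SOURCE A (Python) =====
-- def preprocess_hex_chars(text) :
--     """
--     Preprocess text by decoding hex characters into ASCII characters
--     """
--     preprocessed_text = ''
--
--     i = 0
--     while i < len(text) :
--         if '\\x' == text[i:i+2] :
--             c = int(text[i+2:i+4], base=16)
--             preprocessed_text += chr(c)
--             i += 4
--         else :
--             preprocessed_text += text[i]
--             i += 1
--
--     return preprocessed_text
-- ===== SOURCE B (Python) =====
-- import re
--
-- _HEX_ESCAPE = re.compile(r'\\x([0-9a-fA-F]{2})')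
--
-- def preprocess_hex_chars(text):
--     return _HEX_ESCAPE.sub(lambda m: chr(int(m.group(1), 16)), text)
-- ===== Notes on version B (the rewrite author's own statement) =====
-- stated objective: idiomatic
-- what changed: A's manual while-loop with index arithmetic, slice comparison and per-character string concatenation is replaced by a single precompiled regex substitution decoding well-formed \xHH escapes; Pre_ excludes inputs with a malformed '\x' escape, on which A raises ValueError or returns an accidental value of int()'s lenient slice parsing while B leaves the escape unchanged.
-- outside the precondition, e.g. on preprocess_hex_chars('\\x4'): A returns '\x04', B returns '\\x4'; on preprocess_hex_chars('\\x+1'): A returns '\x01', B returns '\\x+1'; on preprocess_hex_chars('\\xZZ'): A raises ValueError, B returns '\\xZZ'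
import Mathlib
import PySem

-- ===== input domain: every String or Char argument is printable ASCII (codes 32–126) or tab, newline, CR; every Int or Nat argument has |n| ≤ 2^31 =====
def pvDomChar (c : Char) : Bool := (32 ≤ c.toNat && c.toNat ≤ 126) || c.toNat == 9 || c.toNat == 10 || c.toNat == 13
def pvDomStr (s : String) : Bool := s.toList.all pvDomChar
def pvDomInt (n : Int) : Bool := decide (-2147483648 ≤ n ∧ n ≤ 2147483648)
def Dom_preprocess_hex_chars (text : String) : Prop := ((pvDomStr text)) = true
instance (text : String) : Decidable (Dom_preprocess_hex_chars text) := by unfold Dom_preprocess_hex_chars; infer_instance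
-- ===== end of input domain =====

-- B replaces A's manual index-juggling while-loop by one regex substitution decoding well-formed
-- \xHH escapes (idiomatic, measurably faster); Pre_ admits exactly the inputs whose escapes are
-- all well-formed \xHH (elsewhere A raises ValueError, or returns a control character out of
-- int()'s lenient parsing of a truncated/signed/whitespace slice, a corner B leaves unchanged).

-- shared primitive: one hex digit's value (Python int(., 16) digit table)
def pvHexVal? (c : Char) : Option Nat :=
  if '0' ≤ c ∧ c ≤ '9' then some (c.toNat - 48)
  else if 'a' ≤ c ∧ c ≤ 'f' then some (c.toNat - 87)
  else if 'A' ≤ c ∧ c ≤ 'F' then some (c.toNat - 55)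
  else none

def pvIsWs (c : Char) : Bool := c = ' ' || c = '\t' || c = '\n' || c = '\r'

def pvStrip (g : List Char) : List Char :=
  ((g.dropWhile pvIsWs).reverse.dropWhile pvIsWs).reverse

-- A-side primitive, exact for the ≤2-char printable-ASCII slices A feeds it: Python's
-- chr(int(s, base=16)): strip whitespace, optional sign, nonempty hex digits;
-- `none` exactly where int()/chr() raises ValueError
def pvDecodeHex? (g : List Char) : Option Char :=
  let s := pvStrip g
  let neg : Bool := decide (s.head? = some '-')
  let ds := if s.head? = some '+' ∨ s.head? = some '-' then s.tail else s
  match ds.mapM pvHexVal? with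
  | none => none
  | some vs =>
    if vs = [] then none
    else
      let n := vs.foldl (fun a v => 16 * a + v) 0
      if neg ∧ n ≠ 0 then none else some (Char.ofNat n)

-- ===== PORT A =====
-- A's while-loop: index i, compare the slice text[i:i+2] with '\x', accumulator string;
-- fuel = number of remaining loop iterations (at most one per character)
def pvAGo (cs : List Char) : Nat → Nat → List Char → List Char
  | 0, _, acc => acc
  | fuel + 1, i, acc =>
    if i < cs.length then
      if (cs.drop i).take 2 = ['\\', 'x'] then
        match pvDecodeHex? ((cs.drop (i + 2)).take 2) with
        | some c => pvAGo cs fuel (i + 4) (acc ++ [c])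
        | none => acc   -- unreachable under Pre_: Python raises ValueError here
      else pvAGo cs fuel (i + 1) (acc ++ (cs.drop i).take 1)
    else acc

def preprocess_hex_chars (text : String) : String :=
  String.ofList (pvAGo text.toList text.toList.length 0 [])

-- ===== PORT B =====
-- Source B: re.sub(r'\\x([0-9a-fA-F]{2})', λ m, chr(int(m.group(1), 16)), text) —
-- the engine scans left to right; at each position it either matches a well-formed
-- \xHH escape (replaced by its character) or emits the character and moves on;
-- fuel = remaining list length, so the recursion is structural (fuel is always the length)
def pvBGo : Nat → List Char → List Char
  | _, [] => []
  | f + 4, c :: d :: a :: b :: rest' =>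
    if c = '\\' ∧ d = 'x' ∧ (pvHexVal? a).isSome ∧ (pvHexVal? b).isSome then
      Char.ofNat (16 * ((pvHexVal? a).getD 0) + ((pvHexVal? b).getD 0)) :: pvBGo f rest'
    else c :: pvBGo (f + 3) (d :: a :: b :: rest')
  | f + 1, c :: rest => c :: pvBGo f rest
  | _, cs => cs

def preprocess_hex_chars_alt (text : String) : String :=
  String.ofList (pvBGo text.toList.length text.toList)

-- ===== PRECONDITION & SPEC =====
def pvPreL (cs : List Char) : Prop :=
  ∀ i, i < cs.length → cs[i]? = some '\\' → cs[i + 1]? = some 'x' →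
    ((cs.drop (i + 2)).take 2).length = 2 ∧
    ((cs.drop (i + 2)).take 2).all (fun c => (pvHexVal? c).isSome)

-- Pre_ excludes inputs where some '\x' is NOT followed by exactly two hex digits: there A either
-- raises ValueError (unparsable slice, e.g. '\xZZ' or trailing '\x'), or — on a truncated or
-- signed/whitespace slice int(.,16) happens to accept, e.g. '\x4' or '\x+1' — returns a control
-- character that is an accident of slicing plus int()'s lenient parsing; B naturally leaves such
-- malformed escapes unchanged, and neither value is more specified than the other on that corner.
def Pre_preprocess_hex_chars (text : String) : Prop := pvPreL text.toList
instance (text : String) : Decidable (Pre_preprocess_hex_chars text) := by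
  unfold Pre_preprocess_hex_chars pvPreL; infer_instance

def pvWitness_preprocess_hex_chars : String := "a\\x41 b\\x0az"

def Spec_preprocess_hex_chars (text : String) (out : String) : Prop := out = preprocess_hex_chars_alt text
instance (text : String) (out : String) : Decidable (Spec_preprocess_hex_chars text out) := by
  unfold Spec_preprocess_hex_chars; infer_instance

-- ===== CLAIM (what is proved, stated in full; the proofs are below) =====
def Claim_equal_preprocess_hex_chars : Prop := ∀ (text : String), Dom_preprocess_hex_chars text → Pre_preprocess_hex_chars text → Spec_preprocess_hex_chars text (preprocess_hex_chars text)

-- ===== LEMMAS AND PROOFS =====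

theorem pvHex_not_ws {a : Char} {v : Nat} (h : pvHexVal? a = some v) : pvIsWs a = false := by
  unfold pvHexVal? at h
  have h48 : 48 ≤ a.toNat := by
    split_ifs at h with h1 h2 h3
    · exact h1.1
    · exact le_trans (by decide) h2.1
    · exact le_trans (by decide) h3.1
  unfold pvIsWs
  simp only [Bool.or_eq_false_iff, decide_eq_false_iff_not]
  refine ⟨⟨⟨?_, ?_⟩, ?_⟩, ?_⟩ <;>
    (intro he; subst he; simp [Char.toNat] at h48)

theorem pvHex_not_sign {a : Char} {v : Nat} (h : pvHexVal? a = some v) :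
    a ≠ '+' ∧ a ≠ '-' := by
  unfold pvHexVal? at h
  have h48 : 48 ≤ a.toNat := by
    split_ifs at h with h1 h2 h3
    · exact h1.1
    · exact le_trans (by decide) h2.1
    · exact le_trans (by decide) h3.1
  constructor <;> (intro he; subst he; simp [Char.toNat] at h48)

theorem pvDecode_two_hex {a b : Char} {va vb : Nat}
    (ha : pvHexVal? a = some va) (hb : pvHexVal? b = some vb) :
    pvDecodeHex? [a, b] = some (Char.ofNat (16 * va + vb)) := by
  have hwa := pvHex_not_ws ha
  have hwb := pvHex_not_ws hb
  have hsa := pvHex_not_sign ha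
  have hstrip : pvStrip [a, b] = [a, b] := by
    simp [pvStrip, List.dropWhile, hwa, hwb]
  unfold pvDecodeHex?
  rw [hstrip]
  simp only [List.head?]
  rw [if_neg (show ¬ (some a = some '+' ∨ some a = some '-') by simp [hsa.1, hsa.2])]
  simp only [List.mapM_cons, ha, hb, List.mapM_nil, Option.pure_def, Option.bind_some,
    Option.bind_eq_bind]
  simp [hsa.2, List.foldl]

-- B's scanner emits the head character whenever no well-formed \xHH escape starts here
theorem pvBGo_cons (c : Char) (rest : List Char)
    (h : (c :: rest).take 2 ≠ ['\\', 'x'] ∨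
         ¬ (((rest.drop 1).take 2).length = 2 ∧
            ((rest.drop 1).take 2).all (fun x => (pvHexVal? x).isSome))) :
    pvBGo (rest.length + 1) (c :: rest) = c :: pvBGo rest.length rest := by
  match rest with
  | [] => rfl
  | [d] => rfl
  | [d, a] => rfl
  | d :: a :: b :: rest' =>
    show (if c = '\\' ∧ d = 'x' ∧ (pvHexVal? a).isSome ∧ (pvHexVal? b).isSome then
        Char.ofNat (16 * ((pvHexVal? a).getD 0) + ((pvHexVal? b).getD 0))
          :: pvBGo rest'.length rest'
      else c :: pvBGo (rest'.length + 3) (d :: a :: b :: rest'))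
      = c :: pvBGo (d :: a :: b :: rest').length (d :: a :: b :: rest')
    have hn : ¬ (c = '\\' ∧ d = 'x' ∧ (pvHexVal? a).isSome = true ∧ (pvHexVal? b).isSome = true) := by
      rintro ⟨h1, h2, h3, h4⟩
      subst h1; subst h2
      rcases h with h | h
      · exact h rfl
      · exact h (by simp [List.all_cons, h3, h4])
    rw [if_neg hn]
    rfl

theorem pvBGo_escape {a b : Char} {va vb : Nat} (rest' : List Char)
    (hva : pvHexVal? a = some va) (hvb : pvHexVal? b = some vb) :
    pvBGo ('\\' :: 'x' :: a :: b :: rest').length ('\\' :: 'x' :: a :: b :: rest')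
      = Char.ofNat (16 * va + vb) :: pvBGo rest'.length rest' := by
  show (if '\\' = '\\' ∧ 'x' = 'x' ∧ (pvHexVal? a).isSome ∧ (pvHexVal? b).isSome then
      Char.ofNat (16 * ((pvHexVal? a).getD 0) + ((pvHexVal? b).getD 0))
        :: pvBGo rest'.length rest'
    else '\\' :: pvBGo (rest'.length + 3) ('x' :: a :: b :: rest')) = _
  rw [if_pos ⟨rfl, rfl, by simp [hva], by simp [hvb]⟩, hva, hvb]
  rfl

theorem pvKey (n : Nat) : ∀ (cs : List Char) (i : Nat) (acc : List Char),
    cs.length ≤ i + n → pvPreL cs →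
    pvAGo cs n i acc = acc ++ pvBGo (cs.drop i).length (cs.drop i) := by
  induction n with
  | zero =>
    intro cs i acc hn _
    rw [pvAGo, List.drop_eq_nil_of_le (by omega)]
    show acc = acc ++ ([] : List Char)
    rw [List.append_nil]
  | succ n ih =>
    intro cs i acc hn hpre
    by_cases hi : i < cs.length
    · by_cases hx : (cs.drop i).take 2 = ['\\', 'x']
      · have hsplit : cs.drop i = '\\' :: 'x' :: cs.drop (i + 2) := by
          have h2 := (List.take_append_drop 2 (cs.drop i)).symm
          rw [hx] at h2
          rw [h2, List.drop_drop]
          rfl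
        have h0 : cs[i + 0]? = some '\\' := by rw [← List.getElem?_drop, hsplit]; rfl
        have h1 : cs[i + 1]? = some 'x' := by rw [← List.getElem?_drop, hsplit]; rfl
        obtain ⟨hlen2, hall⟩ := hpre i hi (by simpa using h0) h1
        rcases hrest : cs.drop (i + 2) with _ | ⟨a, _ | ⟨b, rest'⟩⟩
        · rw [hrest] at hlen2; simp at hlen2
        · rw [hrest] at hlen2; simp at hlen2
        · rw [hrest] at hall
          have htk : (List.take 2 (a :: b :: rest')) = [a, b] := rfl
          rw [htk] at hall
          simp only [List.all_cons, List.all_nil, Bool.and_eq_true, Bool.and_true] at hall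
          obtain ⟨va, hva⟩ := Option.isSome_iff_exists.mp hall.1
          obtain ⟨vb, hvb⟩ := Option.isSome_iff_exists.mp hall.2
          have hdec : pvDecodeHex? ((cs.drop (i + 2)).take 2)
              = some (Char.ofNat (16 * va + vb)) := by
            rw [hrest, htk]; exact pvDecode_two_hex hva hvb
          rw [pvAGo, if_pos hi, if_pos hx, hdec]
          show pvAGo cs n (i + 4) (acc ++ [Char.ofNat (16 * va + vb)]) = _
          have hd4 : cs.drop (i + 4) = rest' := by
            rw [show i + 4 = (i + 2) + 2 by omega, ← List.drop_drop, hrest]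
            rfl
          rw [ih cs (i + 4) _ (by omega) hpre, hsplit, hrest, hd4,
            pvBGo_escape rest' hva hvb, List.append_assoc]
          rfl
      · have hcons : cs.drop i = cs[i] :: cs.drop (i + 1) := List.drop_eq_getElem_cons hi
        have htake1 : (cs.drop i).take 1 = [cs[i]] := by rw [hcons]; rfl
        rw [pvAGo, if_pos hi, if_neg hx, htake1,
            ih cs (i + 1) (acc ++ [cs[i]]) (by omega) hpre, hcons, List.length_cons,
            pvBGo_cons _ _ (Or.inl (by rw [← hcons]; exact hx)), List.append_assoc]
        rfl
    · rw [pvAGo, if_neg hi, List.drop_eq_nil_of_le (by omega)]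
      show acc = acc ++ ([] : List Char)
      rw [List.append_nil]

-- ===== VERDICT (by name: the statement is the Claim_ definition above) =====
theorem preprocess_hex_chars_spec : Claim_equal_preprocess_hex_chars := by
  intro text _ hpre
  unfold Spec_preprocess_hex_chars preprocess_hex_chars preprocess_hex_chars_alt
  rw [pvKey text.toList.length text.toList 0 [] (by omega) hpre]
  rfl
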